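-- pv_equiv track=rewrite | github.com/pypi-data/pypi-mirror-383 | packages/rnapy/rnapy-3.2.2.tar.gz/rnapy-3.2.2/rnapy/interfaces/sequence_analysis.py | _count_stems
-- ===== SOURCE A (Python) =====
-- def _count_stems(structure: str) -> int:
--     stem_count = 0
--     in_stem = False
--
--     for char in structure:
--         if char == '(' and not in_stem:
--             stem_count += 1
--             in_stem = True
--         elif char == '.' and in_stem:
--             in_stem = False
--
--     return stem_count
-- ===== SOURCE B (Python) =====
-- def _count_stems(structure: str) -> int:
--     return sum(1 for seg in structure.split('.') if '(' in seg)
-- ===== Notes on version B (the rewrite author's own statement) =====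
-- stated objective: simpler
-- what changed: Replaced the char-by-char in_stem state machine with a split-on-'.'-then-count-segments-containing-'(' one-liner (C-level str.split instead of a Python loop).
import Mathlib
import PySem

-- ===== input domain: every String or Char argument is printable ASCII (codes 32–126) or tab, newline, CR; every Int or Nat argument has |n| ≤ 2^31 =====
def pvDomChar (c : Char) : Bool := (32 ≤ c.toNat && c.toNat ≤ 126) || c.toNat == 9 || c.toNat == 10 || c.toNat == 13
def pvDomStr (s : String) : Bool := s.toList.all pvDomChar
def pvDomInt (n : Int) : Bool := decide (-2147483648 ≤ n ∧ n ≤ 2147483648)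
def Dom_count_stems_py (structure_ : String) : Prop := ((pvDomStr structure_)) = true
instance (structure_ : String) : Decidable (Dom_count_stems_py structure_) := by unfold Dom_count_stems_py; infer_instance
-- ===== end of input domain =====

-- B replaces A's in_stem state machine by split('.')-then-count, for simplicity; same value everywhere.

-- ===== PORT A =====
-- literal port of A's loop: state (stem_count, in_stem), one step per character
def count_stems_py (structure_ : String) : Int :=
  (structure_.toList.foldl
    (fun (st : Int × Bool) (c : Char) =>
      if c = '(' ∧ st.2 = false then (st.1 + 1, true)
      else if c = '.' ∧ st.2 = true then (st.1, false)
      else st)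
    (0, false)).1

-- ===== PORT B =====
-- literal port of Source B: split on '.', sum 1 for each segment containing '('
def count_stems_py_alt (structure_ : String) : Int :=
  (PySem.Chars.splitOn structure_.toList ['.']).foldl
    (fun (acc : Int) (seg : List Char) =>
      if PySem.Chars.isIn ['('] seg then acc + 1 else acc) 0

-- ===== PRECONDITION & SPEC =====
def Spec_count_stems_py (structure_ : String) (out : Int) : Prop := out = count_stems_py_alt structure_
instance (structure_ : String) (out : Int) : Decidable (Spec_count_stems_py structure_ out) := by unfold Spec_count_stems_py; infer_instance

-- ===== CLAIM (what is proved, stated in full; the proofs are below) =====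
def Claim_equal_count_stems_py : Prop := ∀ (structure_ : String), Dom_count_stems_py structure_ → Spec_count_stems_py structure_ (count_stems_py structure_)

-- ===== LEMMAS AND PROOFS =====

-- PySem's splitOn with a one-character separator is List.splitOnP
theorem splitOn_go_eq (fuel : ℕ) :
    ∀ (l cur : List Char) (acc : List (List Char)), l.length ≤ fuel →
      PySem.Chars.splitOn.go ['.'] fuel l cur acc
        = acc.reverse ++ (l.splitOnP (· == '.')).modifyHead (cur.reverse ++ ·) := by
  induction fuel with
  | zero =>
    intro l cur acc h
    have hl : l = [] := List.length_eq_zero_iff.mp (Nat.le_zero.mp h)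
    subst hl
    simp [PySem.Chars.splitOn.go, List.splitOnP_nil]
  | succ f ih =>
    intro l cur acc h
    cases l with
    | nil => simp [PySem.Chars.splitOn.go, List.splitOnP_nil]
    | cons c rest =>
      have hlen : rest.length ≤ f := by simpa using Nat.le_of_succ_le_succ h
      by_cases hc : c = '.'
      · subst hc
        rw [PySem.Chars.splitOn.go]
        have hpre : List.isPrefixOf ['.'] ('.' :: rest) = true := by
          simp [List.isPrefixOf]
        rw [if_pos hpre]
        rw [ih _ _ _ (by simpa using hlen)]
        obtain ⟨s0, rest', hs⟩ := List.exists_cons_of_ne_nil (List.splitOnP_ne_nil (· == '.') rest)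
        simp [List.splitOnP_cons, hs]
      · rw [PySem.Chars.splitOn.go]
        have hpre : List.isPrefixOf ['.'] (c :: rest) = false := by
          simp [List.isPrefixOf]; exact fun h => hc h.symm
        rw [if_neg (by simp [hpre])]
        rw [ih _ _ _ hlen]
        obtain ⟨s0, rest', hs⟩ := List.exists_cons_of_ne_nil (List.splitOnP_ne_nil (· == '.') rest)
        simp [List.splitOnP_cons, hs, hc]

theorem splitOn_eq_splitOnP (l : List Char) :
    PySem.Chars.splitOn l ['.'] = l.splitOnP (· == '.') := by
  rw [PySem.Chars.splitOn, splitOn_go_eq _ _ _ _ (Nat.le_succ _)]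
  obtain ⟨s0, rest', hs⟩ := List.exists_cons_of_ne_nil (List.splitOnP_ne_nil (· == '.') l)
  simp [hs]

-- B's fold over segments counts segments containing '('
theorem foldB_eq_countP (ss : List (List Char)) (n : Int) :
    ss.foldl (fun (acc : Int) (seg : List Char) =>
      if PySem.Chars.isIn ['('] seg then acc + 1 else acc) n
      = n + (ss.countP (fun seg => seg.contains '(') : ℤ) := by
  induction ss generalizing n with
  | nil => simp
  | cons s t iht =>
    have hiff : PySem.Chars.isIn ['('] s = s.contains '(' := by
      by_cases hm : '(' ∈ s
      · obtain ⟨l1, l2, hsplit⟩ := List.append_of_mem hm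
        have h1 : PySem.Chars.isIn ['('] s = true :=
          (PySem.Chars.exists_prefix_drop_iff_isIn _ _).mp
            ⟨l1.length, by simp [hsplit, List.cons_prefix_cons]⟩
        simp [h1, List.contains_eq_mem, hm]
      · have h1 : PySem.Chars.isIn ['('] s = false := by
          rw [PySem.Chars.isIn_eq_false_iff]
          intro hinf
          exact hm (hinf.mem (by simp))
        simp [h1, List.contains_eq_mem, hm]
    rw [List.foldl_cons, List.countP_cons, hiff, iht]
    by_cases hm : '(' ∈ s <;> simp [List.contains_eq_mem, hm] <;> ring

-- the key invariant: A's state machine from state (n, b) computes n plus the number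
-- of '('-containing dot-free segments (skipping the first segment when b = true)
theorem stateMachine_eq (l : List Char) :
    ∀ (n : Int) (b : Bool),
      (l.foldl
        (fun (st : Int × Bool) (c : Char) =>
          if c = '(' ∧ st.2 = false then (st.1 + 1, true)
          else if c = '.' ∧ st.2 = true then (st.1, false)
          else st) (n, b)).1
      = n + ((if b then (l.splitOnP (· == '.')).tail
              else l.splitOnP (· == '.')).countP (fun seg => seg.contains '(') : ℤ) := by
  induction l with
  | nil => intro n b; cases b <;> simp [List.splitOnP_nil]
  | cons c t ih =>
    intro n b
    obtain ⟨s0, rest', hs⟩ := List.exists_cons_of_ne_nil (List.splitOnP_ne_nil (· == '.') t)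
    by_cases hdot : c = '.'
    · subst hdot
      cases b <;>
        simp [List.foldl_cons, ih, List.splitOnP_cons, hs]
    · by_cases hpar : c = '('
      · subst hpar
        cases b with
        | false =>
          simp only [List.foldl_cons]
          norm_num
          rw [ih (n + 1) true]
          simp [hs]
          push_cast; ring
        | true =>
          simp only [List.foldl_cons]
          rw [if_neg (by simp), if_neg (by simp [hdot])]
          rw [ih n true]
          simp [List.splitOnP_cons, hs]
      · cases b with
        | false =>
          simp only [List.foldl_cons]
          rw [if_neg (by simp [hpar]), if_neg (by simp [hdot])]
          rw [ih n false]
          simp [List.splitOnP_cons, hs, hdot, List.countP_cons, Ne.symm hpar]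
        | true =>
          simp only [List.foldl_cons]
          rw [if_neg (by simp [hpar]), if_neg (by simp [hdot])]
          rw [ih n true]
          simp [List.splitOnP_cons, hs, hdot]

-- ===== VERDICT (by name: the statement is the Claim_ definition above) =====
theorem count_stems_py_spec : Claim_equal_count_stems_py := by
  intro s _
  unfold Spec_count_stems_py count_stems_py count_stems_py_alt
  rw [splitOn_eq_splitOnP, foldB_eq_countP, stateMachine_eq]
  simp
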